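-- pv_equiv track=rewrite | github.com/gabrielegrillo/Fondamenti1-Unical | n59.py | sommacroce
-- ===== SOURCE A (Python) =====
-- def sommacroce(mat):
--     sumout = 0
--     sumcroce = 0
--     for i in range(len(mat)):
--         for j in range(len(mat)):
--             if (i != len(mat)//2 and j != len(mat)//2):
--                 sumout += mat[i][j]
--             else:
--                 sumcroce += mat[i][j]
--
--     return 'OK' if sumcroce > sumout else 'NO'
-- ===== SOURCE B (Python) =====
-- def sommacroce(mat):
--     n = len(mat)
--     if n == 0:
--         return 'NO'
--     m = n // 2
--     total = sum(sum(row) for row in mat)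
--     cross = sum(mat[m]) + sum(row[m] for row in mat) - mat[m][m]
--     return 'OK' if cross > total - cross else 'NO'
-- ===== Notes on version B (the rewrite author's own statement) =====
-- stated objective: faster
-- what changed: Replaces the O(n^2) per-cell if/else classification loop with a closed-form decomposition: one total sum plus the middle row + middle column - center, comparing cross > total - cross.
-- outside the precondition, e.g. on sommacroce([[0, 0, 100], [0, 1]]): A returns 'OK', B returns 'NO'
import Mathlib
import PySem

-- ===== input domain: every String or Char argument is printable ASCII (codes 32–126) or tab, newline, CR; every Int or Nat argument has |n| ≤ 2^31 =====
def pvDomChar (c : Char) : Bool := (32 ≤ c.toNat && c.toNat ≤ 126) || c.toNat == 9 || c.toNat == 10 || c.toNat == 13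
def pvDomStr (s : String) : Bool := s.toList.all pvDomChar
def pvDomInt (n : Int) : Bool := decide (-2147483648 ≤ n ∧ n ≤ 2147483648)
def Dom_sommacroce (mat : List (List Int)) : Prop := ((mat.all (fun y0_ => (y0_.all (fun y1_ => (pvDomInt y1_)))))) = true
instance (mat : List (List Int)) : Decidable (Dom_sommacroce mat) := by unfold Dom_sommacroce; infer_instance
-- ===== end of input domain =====

-- B replaces A's per-cell if/else classification with a closed-form decomposition
-- (total sum, cross = middle row + middle column - center, compare cross > total - cross).

-- ===== PORT A =====
def sommacroce (mat : List (List Int)) : String :=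
  let n := mat.length
  let p : Int × Int :=
    (List.range n).foldl (fun s i =>
      (List.range n).foldl (fun s j =>
        if i ≠ n / 2 ∧ j ≠ n / 2 then
          (s.1 + ((mat.getD i []).getD j 0), s.2)
        else
          (s.1, s.2 + ((mat.getD i []).getD j 0))) s) (0, 0)
  if p.2 > p.1 then "OK" else "NO"

-- ===== PORT B =====
def sommacroce_alt (mat : List (List Int)) : String :=
  let n := mat.length
  if n = 0 then "NO"
  else
    let m := n / 2
    let total := (mat.map (fun row => row.sum)).sum
    let cross := (mat.getD m []).sum + (mat.map (fun row => row.getD m 0)).sum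
                  - (mat.getD m []).getD m 0
    if cross > total - cross then "OK" else "NO"

-- ===== PRECONDITION & SPEC =====
-- Pre_ restricts to square matrices: on matrices whose rows are longer than
-- len(mat), A still returns but silently ignores the extra columns — an
-- artefact of its index-based iteration — while B sums whole rows; rows
-- shorter than len(mat) make A raise IndexError.
def Pre_sommacroce (mat : List (List Int)) : Prop :=
  ∀ row ∈ mat, row.length = mat.length
instance (mat : List (List Int)) : Decidable (Pre_sommacroce mat) := by
  unfold Pre_sommacroce; infer_instance
def pvWitness_sommacroce : List (List Int) := [[1, 2], [3, 4]]

def Spec_sommacroce (mat : List (List Int)) (out : String) : Prop := out = sommacroce_alt mat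
instance (mat : List (List Int)) (out : String) : Decidable (Spec_sommacroce mat out) := by unfold Spec_sommacroce; infer_instance

-- ===== CLAIM (what is proved, stated in full; the proofs are below) =====
def Claim_equal_sommacroce : Prop := ∀ (mat : List (List Int)), Dom_sommacroce mat → Pre_sommacroce mat → Spec_sommacroce mat (sommacroce mat)

-- ===== LEMMAS AND PROOFS =====

-- A fold whose step adds (f i, g i) to the pair accumulates the two sums.
theorem foldl_pair_add (f g : Nat → Int) (l : List Nat) (s : Int × Int) :
    l.foldl (fun s i => (s.1 + f i, s.2 + g i)) s
      = (s.1 + (l.map f).sum, s.2 + (l.map g).sum) := by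
  induction l generalizing s with
  | nil => simp
  | cons a t ih => simp [ih]; constructor <;> ring

theorem sum_map_range_getD (l : List Int) :
    ((List.range l.length).map (fun j => l.getD j 0)).sum = l.sum := by
  induction l using List.reverseRecOn with
  | nil => simp
  | append_singleton t a ih =>
      rw [List.length_append, List.length_cons, List.length_nil, List.range_succ,
          List.map_append, List.sum_append, List.sum_append]
      have h1 : List.map (fun j => (t ++ [a]).getD j 0) (List.range t.length)
          = List.map (fun j => t.getD j 0) (List.range t.length) := by
        apply List.map_congr_left
        intro j hj
        simp only [List.mem_range] at hj
        simp [List.getD, List.getElem?_append_left hj]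
      rw [h1, ih]
      simp [List.getD]

theorem sum_map_range_single (n m : Nat) (hm : m < n) (c : Int) :
    ((List.range n).map (fun j => if j = m then c else 0)).sum = c := by
  induction n with
  | zero => omega
  | succ n ih =>
      rcases Nat.lt_succ_iff_lt_or_eq.mp hm with h | h
      · simp [List.range_succ, ih h, Nat.ne_of_gt h]
      · subst h
        have : ((List.range m).map (fun j => if j = m then c else 0)).sum = 0 := by
          rw [List.sum_eq_zero]
          intro x hx
          simp only [List.mem_map, List.mem_range] at hx
          obtain ⟨j, hj, rfl⟩ := hx
          simp [Nat.ne_of_lt hj]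
        simp [List.range_succ, this]

theorem sum_map_add (f g : Nat → Int) (l : List Nat) :
    (l.map (fun i => f i + g i)).sum = (l.map f).sum + (l.map g).sum := by
  induction l with
  | nil => simp
  | cons a t ih => simp [ih]; ring

theorem sum_map_range_rows (mat : List (List Int)) (f : List Int → Int) :
    ((List.range mat.length).map (fun i => f (mat.getD i []))).sum
      = (mat.map f).sum := by
  induction mat using List.reverseRecOn with
  | nil => simp
  | append_singleton t a ih =>
      rw [List.length_append, List.length_cons, List.length_nil, List.range_succ,
          List.map_append, List.sum_append, List.map_append, List.sum_append]
      have h1 : List.map (fun i => f ((t ++ [a]).getD i [])) (List.range t.length)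
          = List.map (fun i => f (t.getD i [])) (List.range t.length) := by
        apply List.map_congr_left
        intro i hi
        simp only [List.mem_range] at hi
        simp [List.getD, List.getElem?_append_left hi]
      rw [h1, ih]
      simp [List.getD]

theorem sommacroce_eq (mat : List (List Int)) (hpre : Pre_sommacroce mat) :
    sommacroce mat = sommacroce_alt mat := by
  rcases eq_or_ne mat [] with rfl | hne
  · decide
  have hn : 0 < mat.length := List.length_pos_of_ne_nil hne
  set n := mat.length with hnd
  set m := n / 2 with hmd
  have hmn : m < n := Nat.div_lt_self hn (by norm_num)
  -- rewrite A's inner step into the (f, g)-add shape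
  have hinner : ∀ (s : Int × Int) i,
      (List.range n).foldl (fun s j =>
        if i ≠ m ∧ j ≠ m then (s.1 + (mat.getD i []).getD j 0, s.2)
        else (s.1, s.2 + (mat.getD i []).getD j 0)) s
      = (s.1 + ((List.range n).map (fun j => if i ≠ m ∧ j ≠ m then (mat.getD i []).getD j 0 else 0)).sum,
         s.2 + ((List.range n).map (fun j => if i ≠ m ∧ j ≠ m then 0 else (mat.getD i []).getD j 0)).sum) := by
    intro s i
    have hstep : (fun (s : Int × Int) j =>
        if i ≠ m ∧ j ≠ m then (s.1 + (mat.getD i []).getD j 0, s.2)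
        else (s.1, s.2 + (mat.getD i []).getD j 0))
      = (fun (s : Int × Int) j =>
        (s.1 + (if i ≠ m ∧ j ≠ m then (mat.getD i []).getD j 0 else 0),
         s.2 + (if i ≠ m ∧ j ≠ m then 0 else (mat.getD i []).getD j 0))) := by
      funext s j; split <;> simp
    rw [hstep]
    exact foldl_pair_add _ _ _ s
  -- the whole double loop
  have houter :
      (List.range n).foldl (fun s i =>
        (List.range n).foldl (fun s j =>
          if i ≠ m ∧ j ≠ m then (s.1 + (mat.getD i []).getD j 0, s.2)
          else (s.1, s.2 + (mat.getD i []).getD j 0)) s) ((0 : Int), (0 : Int))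
      = (((List.range n).map (fun i =>
            ((List.range n).map (fun j => if i ≠ m ∧ j ≠ m then (mat.getD i []).getD j 0 else 0)).sum)).sum,
         ((List.range n).map (fun i =>
            ((List.range n).map (fun j => if i ≠ m ∧ j ≠ m then 0 else (mat.getD i []).getD j 0)).sum)).sum) := by
    have hfe : (fun (s : Int × Int) i =>
        (List.range n).foldl (fun s j =>
          if i ≠ m ∧ j ≠ m then (s.1 + (mat.getD i []).getD j 0, s.2)
          else (s.1, s.2 + (mat.getD i []).getD j 0)) s)
        = (fun (s : Int × Int) i =>
          (s.1 + ((List.range n).map (fun j => if i ≠ m ∧ j ≠ m then (mat.getD i []).getD j 0 else 0)).sum,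
           s.2 + ((List.range n).map (fun j => if i ≠ m ∧ j ≠ m then 0 else (mat.getD i []).getD j 0)).sum)) := by
      funext s i; exact hinner s i
    rw [hfe, foldl_pair_add]
    simp
  -- row lengths
  have hrow : ∀ i < n, (mat.getD i []).length = n := by
    intro i hi
    have : mat.getD i [] ∈ mat := by
      rw [List.getD_eq_getElem _ _ hi]; exact List.getElem_mem _
    exact hpre _ this
  have hrowsum : ∀ i < n,
      ((List.range n).map (fun j => (mat.getD i []).getD j 0)).sum = (mat.getD i []).sum := by
    intro i hi
    have h := sum_map_range_getD (mat.getD i [])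
    rw [hrow i hi] at h
    exact h
  have hcol : ∀ i, ((List.range n).map (fun j => if j = m then (mat.getD i []).getD j 0 else 0)).sum
      = (mat.getD i []).getD m 0 := by
    intro i
    have h1 : ((List.range n).map (fun j => if j = m then (mat.getD i []).getD j 0 else 0))
        = ((List.range n).map (fun j => if j = m then (mat.getD i []).getD m 0 else 0)) := by
      apply List.map_congr_left; intro j _; by_cases h : j = m <;> simp [h]
    rw [h1, sum_map_range_single n m hmn]
  -- G_i : what row i contributes to sumcroce
  have hG : ∀ i < n,
      ((List.range n).map (fun j => if i ≠ m ∧ j ≠ m then 0 else (mat.getD i []).getD j 0)).sum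
      = if i = m then (mat.getD i []).sum else (mat.getD i []).getD m 0 := by
    intro i hi
    by_cases h : i = m
    · rw [if_pos h]
      have h1 : ((List.range n).map (fun j => if i ≠ m ∧ j ≠ m then 0 else (mat.getD i []).getD j 0))
          = ((List.range n).map (fun j => (mat.getD i []).getD j 0)) := by
        apply List.map_congr_left; intro j _; simp [h]
      rw [h1]; exact hrowsum i hi
    · rw [if_neg h, ← hcol i]
      apply congrArg; apply List.map_congr_left
      intro j _; by_cases hj : j = m <;> simp [h, hj]
  -- F_i : contribution to sumout
  have hF : ∀ i < n,
      ((List.range n).map (fun j => if i ≠ m ∧ j ≠ m then (mat.getD i []).getD j 0 else 0)).sum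
      = (mat.getD i []).sum - (if i = m then (mat.getD i []).sum else (mat.getD i []).getD m 0) := by
    intro i hi
    have hsplit : ((List.range n).map (fun j => (if i ≠ m ∧ j ≠ m then (mat.getD i []).getD j 0 else 0)
        + (if i ≠ m ∧ j ≠ m then 0 else (mat.getD i []).getD j 0))).sum
        = ((List.range n).map (fun j => (mat.getD i []).getD j 0)).sum := by
      apply congrArg; apply List.map_congr_left
      intro j _; by_cases h : i ≠ m ∧ j ≠ m <;> simp [h]
    rw [sum_map_add, hG i hi, hrowsum i hi] at hsplit
    omega
  -- names for the four sums
  set G := ((List.range n).map (fun i =>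
      ((List.range n).map (fun j => if i ≠ m ∧ j ≠ m then 0 else (mat.getD i []).getD j 0)).sum)).sum with hGdef
  set F := ((List.range n).map (fun i =>
      ((List.range n).map (fun j => if i ≠ m ∧ j ≠ m then (mat.getD i []).getD j 0 else 0)).sum)).sum with hFdef
  set total := (mat.map (fun row => row.sum)).sum with htotdef
  set cross := (mat.getD m []).sum + (mat.map (fun row => row.getD m 0)).sum
      - (mat.getD m []).getD m 0 with hcrossdef
  have hGval : G = cross := by
    rw [hGdef]
    have h1 : ((List.range n).map (fun i =>
        ((List.range n).map (fun j => if i ≠ m ∧ j ≠ m then 0 else (mat.getD i []).getD j 0)).sum))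
        = ((List.range n).map (fun i =>
            (if i = m then (mat.getD m []).sum - (mat.getD m []).getD m 0 else 0)
              + (mat.getD i []).getD m 0)) := by
      apply List.map_congr_left
      intro i hi
      simp only [List.mem_range] at hi
      rw [hG i hi]
      by_cases h : i = m <;> simp [h]
    rw [h1, sum_map_add, sum_map_range_single n m hmn,
        sum_map_range_rows mat (fun row => row.getD m 0), hcrossdef]
    ring
  have hFGval : F + G = total := by
    rw [hFdef, hGdef, ← sum_map_add]
    have h1 : ((List.range n).map (fun i =>
        ((List.range n).map (fun j => if i ≠ m ∧ j ≠ m then (mat.getD i []).getD j 0 else 0)).sum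
        + ((List.range n).map (fun j => if i ≠ m ∧ j ≠ m then 0 else (mat.getD i []).getD j 0)).sum))
        = ((List.range n).map (fun i => (mat.getD i []).sum)) := by
      apply List.map_congr_left
      intro i hi
      simp only [List.mem_range] at hi
      rw [hF i hi, hG i hi]; ring
    rw [h1, sum_map_range_rows mat (fun row => row.sum), htotdef]
  -- finish
  simp only [sommacroce, sommacroce_alt]
  simp only [← hnd, ← hmd]
  rw [houter, ← htotdef, ← hcrossdef]
  show (if G > F then "OK" else "NO")
      = if n = 0 then "NO" else if cross > total - cross then "OK" else "NO"
  rw [if_neg (show ¬ n = 0 by omega)]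
  by_cases h : G > F
  · rw [if_pos h, if_pos (show cross > total - cross by omega)]
  · rw [if_neg h, if_neg (show ¬ cross > total - cross by omega)]

-- ===== VERDICT (by name: the statement is the Claim_ definition above) =====
theorem sommacroce_spec : Claim_equal_sommacroce := by
  intro mat _ hpre
  exact sommacroce_eq mat hpre
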